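-- pv_equiv track=rewrite | github.com/beyzzk/hamming-sec-ded-code | main.py | apply_check_bits
-- ===== SOURCE A (Python) =====
-- def is_power_of_two(n):
--     return n and (n & (n - 1)) == 0
--
-- def calculate_parity_bit(bits):
--     #tüm bitlerin XOR'u alınır
--     parity = 0
--     for b in bits:
--         parity ^= int(b)
--     return parity
--
-- def apply_check_bits(code_bits, check_value):
--     n = len(code_bits)
--     for i in range(n):
--         pos = n - i
--         if is_power_of_two(pos):
--             bit_no = (pos).bit_length() - 1
--             value = (check_value >> bit_no) & 1
--             code_bits[i] = str(value)
--     parity = calculate_parity_bit(code_bits)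
--     code_bits.insert(0, str(parity))
--     return code_bits
-- ===== SOURCE B (Python) =====
-- def calculate_parity_bit(bits):
--     parity = 0
--     for b in bits:
--         parity ^= int(b)
--     return parity
--
-- def apply_check_bits(code_bits, check_value):
--     # enumerate power-of-two positions directly instead of scanning every index
--     n = len(code_bits)
--     bit_no = 0
--     while (1 << bit_no) <= n:
--         code_bits[n - (1 << bit_no)] = str((check_value >> bit_no) & 1)
--         bit_no += 1
--     parity = calculate_parity_bit(code_bits)
--     code_bits.insert(0, str(parity))
--     return code_bits
-- ===== Notes on version B (the rewrite author's own statement) =====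
-- stated objective: alternative
-- what changed: A scans every index of the list and tests each position with an is_power_of_two bit trick; B never tests any position and instead enumerates the power-of-two positions directly (bit_no = 0,1,2,... while 1<<bit_no <= n), writing each check bit once.
import Mathlib
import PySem

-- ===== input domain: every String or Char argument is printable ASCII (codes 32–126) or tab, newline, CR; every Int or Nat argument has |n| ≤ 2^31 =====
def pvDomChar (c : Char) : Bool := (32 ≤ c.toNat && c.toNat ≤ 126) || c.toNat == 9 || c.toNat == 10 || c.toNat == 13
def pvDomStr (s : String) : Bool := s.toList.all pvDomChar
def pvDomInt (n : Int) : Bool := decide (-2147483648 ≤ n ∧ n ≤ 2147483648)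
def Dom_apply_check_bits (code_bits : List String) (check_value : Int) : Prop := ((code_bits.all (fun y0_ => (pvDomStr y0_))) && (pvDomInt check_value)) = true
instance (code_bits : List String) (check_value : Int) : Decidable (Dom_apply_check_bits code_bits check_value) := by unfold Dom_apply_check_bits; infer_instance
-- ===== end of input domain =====

-- B replaces A's scan of every index (testing each position for being a power of two) by a loop that
-- enumerates the power-of-two positions 1<<k directly; same return value, and both A and B mutate the
-- caller's list in Python (the equivalence proved here is about the return value).

-- ===== PORT A =====
def is_power_of_two (n : Int) : Bool := decide (n ≠ 0) && (PySem.Int.band n (n - 1) == 0)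

-- int(b) may raise ValueError: the fold carries Option, none = raise (excluded by Pre_)
def calculate_parity_bit (bits : List String) : Option Int :=
  bits.foldl (fun acc b => acc.bind (fun parity => (PySem.Int.ofStr? b).map (fun v => PySem.Int.bxor parity v))) (some 0)

def apply_check_bits (code_bits : List String) (check_value : Int) : List String :=
  let n : Int := PySem.List.len code_bits
  let bits := (PySem.List.pyRange 0 n 1).foldl (fun cb i =>
      let pos := n - i
      if is_power_of_two pos then
        let bit_no := PySem.Int.bitLength pos - 1
        let value := PySem.Int.band (check_value >>> bit_no) 1
        cb.set i.toNat (PySem.Int.toStr value)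
      else cb) code_bits
  let parity := (calculate_parity_bit bits).getD 0
  PySem.Int.toStr parity :: bits

-- ===== PORT B =====
-- 'while (1 << bit_no) <= n' loop of Source B; terminates since bit_no < 2 ^ bit_no ≤ n
def setCheckBits (cb : List String) (check_value : Int) (n bit_no : Nat) : List String :=
  if h : 1 <<< bit_no ≤ n then
    setCheckBits (cb.set (n - 1 <<< bit_no) (PySem.Int.toStr (PySem.Int.band (check_value >>> bit_no) 1)))
      check_value n (bit_no + 1)
  else cb
termination_by n - bit_no
decreasing_by
  have : bit_no < n := Nat.lt_of_lt_of_le (by rw [Nat.one_shiftLeft] at h ⊢; exact Nat.lt_two_pow_self) h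
  omega

def apply_check_bits_alt (code_bits : List String) (check_value : Int) : List String :=
  let n := code_bits.length
  let bits := setCheckBits code_bits check_value n 0
  let parity := (calculate_parity_bit bits).getD 0
  PySem.Int.toStr parity :: bits

-- ===== PRECONDITION & SPEC =====
-- Pre_ excludes exactly the inputs on which Python A raises ValueError: an element at a
-- non-power-of-two position (hence not overwritten by a check bit) that int() cannot parse.
def Pre_apply_check_bits (code_bits : List String) (check_value : Int) : Prop :=
  ∀ i : Fin code_bits.length,
    (code_bits.length - i.1) &&& (code_bits.length - i.1 - 1) ≠ 0 →
    (PySem.Int.ofStr? code_bits[i]).isSome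
instance (code_bits : List String) (check_value : Int) : Decidable (Pre_apply_check_bits code_bits check_value) := by unfold Pre_apply_check_bits; infer_instance
def pvWitness_apply_check_bits : List String × Int := (["1", "0", " 7 ", "0", "-2"], 5)

def Spec_apply_check_bits (code_bits : List String) (check_value : Int) (out : List String) : Prop := out = apply_check_bits_alt code_bits check_value
instance (code_bits : List String) (check_value : Int) (out : List String) : Decidable (Spec_apply_check_bits code_bits check_value out) := by unfold Spec_apply_check_bits; infer_instance

-- ===== CLAIM (what is proved, stated in full; the proofs are below) =====
def Claim_equal_apply_check_bits : Prop := ∀ (code_bits : List String) (check_value : Int), Dom_apply_check_bits code_bits check_value → Pre_apply_check_bits code_bits check_value → Spec_apply_check_bits code_bits check_value (apply_check_bits code_bits check_value)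

-- ===== LEMMAS AND PROOFS =====

-- the check-bit string written for bit number (bitLength (n-j) - 1)
def bitVal (check_value : Int) (n j : Nat) : String :=
  PySem.Int.toStr (PySem.Int.band (check_value >>> (PySem.Int.bitLength ((n - j : Nat) : Int) - 1)) 1)

lemma and_pred_eq_zero_iff : ∀ w : Nat, w ≠ 0 → ((w &&& (w - 1) = 0) ↔ ∃ m, w = 2 ^ m) := by
  intro w
  induction w using Nat.strong_induction_on with
  | _ w ih =>
  intro hw
  constructor
  · intro h0
    by_cases h1 : w = 1
    · exact ⟨0, by omega⟩
    have h2 : 2 ≤ w := by omega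
    have hdiv : (w &&& (w - 1)) / 2 = (w / 2) &&& ((w - 1) / 2) := Nat.and_div_two
    rw [h0] at hdiv
    rcases Nat.even_or_odd w with he | ho
    · have hw2 : w % 2 = 0 := Nat.even_iff.1 he
      have e1 : (w - 1) / 2 = w / 2 - 1 := by omega
      rw [e1] at hdiv
      rcases (ih (w / 2) (by omega) (by omega)).1 hdiv.symm with ⟨m, hm⟩
      refine ⟨m + 1, ?_⟩
      have : 2 ^ (m + 1) = 2 ^ m * 2 := pow_succ 2 m
      omega
    · have hw2 : w % 2 = 1 := Nat.odd_iff.1 ho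
      have e1 : (w - 1) / 2 = w / 2 := by omega
      rw [e1, Nat.and_self] at hdiv
      omega
  · rintro ⟨m, rfl⟩
    rw [Nat.and_two_pow_sub_one_eq_mod]
    exact Nat.mod_self _

lemma bitLength_two_pow (m : Nat) : PySem.Int.bitLength ((2 ^ m : Nat) : Int) = m + 1 := by
  induction m with
  | zero => decide
  | succ m ih =>
    rw [PySem.Int.bitLength_natCast (Nat.two_pow_pos (m + 1))]
    have h2 : 2 ^ (m + 1) / 2 = 2 ^ m := by
      rw [pow_succ]; exact Nat.mul_div_cancel _ (by norm_num)
    rw [h2, ih]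

lemma A_get (check_value : Int) (n : Nat) :
    ∀ (fuel a : Nat) (cb : List String), n - a = fuel → n ≤ cb.length → ∀ j : Nat,
      ((PySem.List.pyRange (a : Int) (n : Int) 1).foldl (fun cb i =>
        let pos := (n : Int) - i
        if is_power_of_two pos then
          let bit_no := PySem.Int.bitLength pos - 1
          let value := PySem.Int.band (check_value >>> bit_no) 1
          cb.set i.toNat (PySem.Int.toStr value)
        else cb) cb)[j]? =
      if a ≤ j ∧ j < n ∧ (n - j) &&& (n - j - 1) = 0 then some (bitVal check_value n j) else cb[j]? := by
  intro fuel
  induction fuel with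
  | zero =>
    intro a cb hf hlen j
    have han : ¬ a < n := by omega
    rw [PySem.List.pyRange_one_eq_nil (by exact_mod_cast Nat.le_of_not_lt han)]
    rw [List.foldl_nil, if_neg]
    rintro ⟨hc1, hc2, -⟩; omega
  | succ f ih =>
    intro a cb hf hlen j
    have han : a < n := by omega
    rw [PySem.List.pyRange_one_cons (by exact_mod_cast han), List.foldl_cons]
    have hcast : ((a : Int) + 1) = ((a + 1 : Nat) : Int) := by push_cast; ring
    rw [hcast]
    dsimp only
    have hw1 : 1 ≤ n - a := by omega
    have hpos : (n : Int) - (a : Int) = ((n - a : Nat) : Int) := by push_cast [Nat.le_of_lt han]; ring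
    have hip : is_power_of_two ((n : Int) - (a : Int)) = ((n - a) &&& (n - a - 1) == 0) := by
      rw [hpos]
      unfold is_power_of_two
      have hsub : ((n - a : Nat) : Int) - 1 = ((n - a - 1 : Nat) : Int) := by push_cast [hw1]; ring
      rw [hsub, PySem.Int.band_natCast]
      have hne : (n - a : Nat) ≠ 0 := by omega
      simp [hne]
    by_cases hC : (n - a) &&& (n - a - 1) = 0
    · rw [hip]
      rw [if_pos (by simp [hC])]
      rw [hpos]
      rw [ih (a + 1) _ (by omega) (by rw [List.length_set]; exact hlen) j]
      by_cases hja : j = a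
      · subst hja
        rw [if_neg (by rintro ⟨hc1, -, -⟩; omega), if_pos ⟨le_refl _, han, hC⟩]
        rw [show ((j : Int)).toNat = j from Int.toNat_natCast j]
        rw [List.getElem?_set_self (by omega)]
        rfl
      · rw [show ((a : Int)).toNat = a from Int.toNat_natCast a]
        rw [List.getElem?_set_ne (fun h => hja h.symm)]
        by_cases hcj : a + 1 ≤ j ∧ j < n ∧ (n - j) &&& (n - j - 1) = 0
        · rw [if_pos hcj, if_pos ⟨by omega, hcj.2.1, hcj.2.2⟩]
        · rw [if_neg hcj, if_neg]
          rintro ⟨hc1, hc2, hc3⟩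
          exact hcj ⟨by omega, hc2, hc3⟩
    · rw [hip, if_neg (by simp [hC])]
      rw [ih (a + 1) _ (by omega) hlen j]
      by_cases hcj : a + 1 ≤ j ∧ j < n ∧ (n - j) &&& (n - j - 1) = 0
      · rw [if_pos hcj, if_pos ⟨by omega, hcj.2.1, hcj.2.2⟩]
      · rw [if_neg hcj, if_neg]
        rintro ⟨hc1, hc2, hc3⟩
        by_cases hja : j = a
        · subst hja; exact hC hc3
        · exact hcj ⟨by omega, hc2, hc3⟩

lemma B_get (check_value : Int) (n : Nat) :
    ∀ (fuel k : Nat) (cb : List String), n - k = fuel → n ≤ cb.length → ∀ j : Nat,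
      (setCheckBits cb check_value n k)[j]? =
      if 2 ^ k ≤ n - j ∧ j < n ∧ (n - j) &&& (n - j - 1) = 0 then some (bitVal check_value n j) else cb[j]? := by
  intro fuel
  induction fuel with
  | zero =>
    intro k cb hf hlen j
    have hkn : k < 2 ^ k := Nat.lt_two_pow_self
    rw [setCheckBits, dif_neg (by rw [Nat.one_shiftLeft]; omega)]
    rw [if_neg]
    rintro ⟨hc1, hc2, -⟩
    have : 2 ^ k ≤ n := le_trans hc1 (Nat.sub_le n j)
    omega
  | succ f ih =>
    intro k cb hf hlen j
    rw [setCheckBits]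
    have hp : 0 < 2 ^ k := Nat.two_pow_pos k
    by_cases h : 2 ^ k ≤ n
    · rw [dif_pos (by rwa [Nat.one_shiftLeft])]
      rw [Nat.one_shiftLeft]
      have hkn : k < n := Nat.lt_of_lt_of_le Nat.lt_two_pow_self h
      rw [ih (k + 1) _ (by omega) (by rw [List.length_set]; exact hlen) j]
      by_cases hj : j = n - 2 ^ k
      · subst hj
        have hnj : n - (n - 2 ^ k) = 2 ^ k := by omega
        have hjn : n - 2 ^ k < n := by omega
        rw [if_neg (by rw [hnj]; rintro ⟨hc1, -, -⟩; rw [pow_succ] at hc1; omega)]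
        rw [List.getElem?_set_self (by omega)]
        rw [if_pos ⟨by omega, hjn, by rw [hnj, Nat.and_two_pow_sub_one_eq_mod]; exact Nat.mod_self _⟩]
        unfold bitVal
        rw [hnj, bitLength_two_pow]
        norm_num
      · rw [List.getElem?_set_ne (fun hh => hj hh.symm)]
        by_cases hcj : 2 ^ (k + 1) ≤ n - j ∧ j < n ∧ (n - j) &&& (n - j - 1) = 0
        · rw [if_pos hcj, if_pos ⟨by rw [pow_succ] at hcj; omega, hcj.2.1, hcj.2.2⟩]
        · rw [if_neg hcj, if_neg]
          rintro ⟨hc1, hc2, hc3⟩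
          apply hcj
          refine ⟨?_, hc2, hc3⟩
          rcases (and_pred_eq_zero_iff (n - j) (by omega)).1 hc3 with ⟨m, hm⟩
          have hkm : k ≤ m := (Nat.pow_le_pow_iff_right (by norm_num)).1 (hm ▸ hc1)
          have hmk : m ≠ k := by
            intro hmk
            apply hj
            rw [hmk] at hm
            omega
          calc 2 ^ (k + 1) ≤ 2 ^ m := Nat.pow_le_pow_right (by norm_num) (by omega)
            _ ≤ n - j := by omega
    · rw [dif_neg (by rw [Nat.one_shiftLeft]; exact h)]
      rw [if_neg]
      rintro ⟨hc1, -, -⟩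
      exact h (le_trans hc1 (Nat.sub_le n j))

lemma phase_eq (check_value : Int) (cb : List String) :
    setCheckBits cb check_value cb.length 0 =
      (PySem.List.pyRange 0 (cb.length : Int) 1).foldl (fun c i =>
        let pos := (cb.length : Int) - i
        if is_power_of_two pos then
          let bit_no := PySem.Int.bitLength pos - 1
          let value := PySem.Int.band (check_value >>> bit_no) 1
          c.set i.toNat (PySem.Int.toStr value)
        else c) cb := by
  apply List.ext_getElem?
  intro j
  rw [B_get check_value cb.length cb.length 0 cb rfl (le_refl _) j]
  have hA := A_get check_value cb.length cb.length 0 cb rfl (le_refl _) j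
  rw [Nat.cast_zero] at hA
  rw [hA]
  by_cases hcj : j < cb.length ∧ (cb.length - j) &&& (cb.length - j - 1) = 0
  · rw [if_pos ⟨by omega, hcj.1, hcj.2⟩, if_pos ⟨by omega, hcj.1, hcj.2⟩]
  · rw [if_neg (fun h => hcj ⟨h.2.1, h.2.2⟩), if_neg (fun h => hcj ⟨h.2.1, h.2.2⟩)]

-- ===== VERDICT (by name: the statement is the Claim_ definition above) =====
theorem apply_check_bits_spec : Claim_equal_apply_check_bits := by
  intro code_bits check_value _hdom _hpre
  unfold Spec_apply_check_bits
  simp only [apply_check_bits, apply_check_bits_alt, PySem.List.len_eq]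
  rw [phase_eq]
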